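-- pv_equiv track=rewrite | github.com/snr359/thesis | fitness_functions.py | hiff
-- ===== SOURCE A (Python) =====
-- def hiff(x):
--     # returns (fitness, value), where fitness is the fitness of the subtree x and value is the boolean value of the tree,
--     # or '-' if the trees do not match
--     if len(x) == 1:
--         return 0, x[0]
--     else:
--         split = int(len(x) / 2)
--         fitnessLeft, valueLeft = hiff(x[:split])
--         fitnessRight, valueRight = hiff(x[split:])
--         if valueRight != valueLeft or valueLeft == '-' or valueRight == '-':
--             return fitnessLeft + fitnessRight, '-'
--         else:
--             return len(x) + fitnessLeft + fitnessRight, valueLeft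
-- ===== SOURCE B (Python) =====
-- def hiff(x):
--     # Iterative worklist over subtree blocks: each block contributes len(block) iff it is
--     # uniform and not '-'; no value propagation between levels.
--     if len(x) == 1:
--         return 0, x[0]
--     fitness = 0
--     stack = [x]
--     while stack:
--         seg = stack.pop()
--         if len(seg) <= 1:
--             continue
--         v = seg[0]
--         if v != '-' and all(e == v for e in seg):
--             fitness += len(seg)
--         mid = len(seg) // 2
--         stack.append(seg[:mid])
--         stack.append(seg[mid:])
--     v = x[0]
--     return fitness, (v if v != '-' and all(e == v for e in x) else '-')
-- ===== Notes on version B (the rewrite author's own statement) =====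
-- stated objective: alternative
-- what changed: Replaces the recursive value-propagating tree evaluation by an iterative explicit-stack worklist over blocks, where each block contributes its length iff it is directly scanned as uniform and not '-', with no values flowing between levels.
import Mathlib
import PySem

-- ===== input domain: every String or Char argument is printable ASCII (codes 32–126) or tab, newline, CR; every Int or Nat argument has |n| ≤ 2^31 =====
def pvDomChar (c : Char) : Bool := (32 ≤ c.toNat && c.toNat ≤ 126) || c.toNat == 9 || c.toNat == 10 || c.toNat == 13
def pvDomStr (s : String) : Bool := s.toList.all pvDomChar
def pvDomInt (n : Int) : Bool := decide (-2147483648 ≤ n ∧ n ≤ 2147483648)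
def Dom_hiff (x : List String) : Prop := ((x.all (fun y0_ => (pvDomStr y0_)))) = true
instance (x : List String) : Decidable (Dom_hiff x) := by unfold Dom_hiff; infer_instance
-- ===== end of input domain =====

-- B replaces A's recursive value-propagating tree evaluation by an iterative explicit-stack worklist
-- in which each block contributes its length iff a direct scan finds it uniform and not "-" (alternative decomposition, same cost).
-- Both recursions are written with a structural fuel argument that only makes them total
-- (fuel ≥ x.length resp. fuel ≥ the worklist measure on every call, proved in the lemmas below).

-- ===== PORT A =====
-- port of `v != '-' ...` uniformity tests appears only on the B side; A propagates values instead.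
def hiffGo (fuel : Nat) (x : List String) : Int × String :=
  match fuel with
  | 0 => (0, "-")          -- never reached when fuel ≥ x.length (totality guard only)
  | fuel + 1 =>
    if x.length = 1 then (0, x.headI)
    else if x.length = 0 then (0, "-")   -- A recurses forever here (RecursionError); excluded by Pre_hiff
    else
      let split := x.length / 2
      let l := hiffGo fuel (x.take split)
      let r := hiffGo fuel (x.drop split)
      if r.2 ≠ l.2 ∨ l.2 = "-" ∨ r.2 = "-" then (l.1 + r.1, "-")
      else ((x.length : Int) + l.1 + r.1, l.2)

def hiff (x : List String) : Int × String := hiffGo x.length x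

-- ===== PORT B =====
-- port of `v != '-' and all(e == v for e in seg)` with v = seg[0] (callers ensure seg nonempty)
def hiffUnif (seg : List String) : Bool :=
  decide (seg.headI ≠ "-" ∧ ∀ e ∈ seg, e = seg.headI)

def hiffLoopGo (fuel : Nat) (stack : List (List String)) (fitness : Int) : Int :=
  match fuel, stack with
  | _, [] => fitness
  | 0, _ :: _ => fitness   -- never reached when fuel ≥ the worklist measure (totality guard only)
  | fuel + 1, seg :: rest =>
    if seg.length ≤ 1 then hiffLoopGo fuel rest fitness
    else
      -- Python: fitness update, mid = len(seg)//2, push seg[:mid] then seg[mid:] (top = seg[mid:])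
      hiffLoopGo fuel (seg.drop (seg.length / 2) :: seg.take (seg.length / 2) :: rest)
        (if hiffUnif seg then fitness + (seg.length : Int) else fitness)

def hiff_alt (x : List String) : Int × String :=
  if x.length = 1 then (0, x.headI)
  else
    let f := hiffLoopGo (2 * x.length + 1) [x] 0
    if x = [] then (0, "-")   -- B raises IndexError (x[0]) here; excluded by Pre_hiff
    else (f, if hiffUnif x then x.headI else "-")

-- ===== PRECONDITION & SPEC =====
-- Both Pythons raise on the empty list (A: RecursionError, B: IndexError).
def Pre_hiff (x : List String) : Prop := x ≠ []
instance (x : List String) : Decidable (Pre_hiff x) := by unfold Pre_hiff; infer_instance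
def pvWitness_hiff : List String := ["0", "0", "1"]
def Spec_hiff (x : List String) (out : Int × String) : Prop := out = hiff_alt x
instance (x : List String) (out : Int × String) : Decidable (Spec_hiff x out) := by unfold Spec_hiff; infer_instance

-- ===== CLAIM (what is proved, stated in full; the proofs are below) =====
def Claim_equal_hiff : Prop := ∀ (x : List String), Dom_hiff x → Pre_hiff x → Spec_hiff x (hiff x)

-- ===== LEMMAS AND PROOFS =====

-- fitness of a subtree, in recursive form (proof-only helper)
theorem pvDecTake' (x : List String) (_h1 : ¬ x.length = 1) (h0 : ¬ x.length = 0) :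
    (x.take (x.length / 2)).length < x.length := by
  simp [List.length_take]; omega

theorem pvDecDrop' (x : List String) (_h1 : ¬ x.length = 1) (h0 : ¬ x.length = 0) :
    (x.drop (x.length / 2)).length < x.length := by
  simp [List.length_drop]; omega

def hiffF (x : List String) : Int :=
  if x.length ≤ 1 then 0
  else (if hiffUnif x then (x.length : Int) else 0)
      + hiffF (x.take (x.length / 2)) + hiffF (x.drop (x.length / 2))
termination_by x.length
decreasing_by
  · exact pvDecTake' x (by omega) (by omega)
  · exact pvDecDrop' x (by omega) (by omega)

-- value of a subtree, in closed form (proof-only helper)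
def hiffV (x : List String) : String :=
  if x.length = 1 then x.headI else if hiffUnif x then x.headI else "-"

-- the worklist measure: B's loop terminates because it strictly decreases
def pvMeasure (stack : List (List String)) : Nat :=
  (stack.map (fun s => if s.length = 0 then 1 else 2 * s.length - 1)).sum

theorem pvDecSkip (seg : List String) (rest : List (List String)) :
    pvMeasure rest < pvMeasure (seg :: rest) := by
  simp only [pvMeasure, List.map_cons, List.sum_cons]
  split_ifs <;> omega

theorem pvDecSplit (seg : List String) (rest : List (List String)) (h : ¬ seg.length ≤ 1) :
    pvMeasure (seg.drop (seg.length / 2) :: seg.take (seg.length / 2) :: rest) < pvMeasure (seg :: rest) := by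
  simp only [pvMeasure, List.map_cons, List.sum_cons, List.length_take, List.length_drop]
  split_ifs <;> omega

theorem hiffF_leaf (x : List String) (h : x.length ≤ 1) : hiffF x = 0 := by
  rw [hiffF, if_pos h]

theorem hiffF_node (x : List String) (h : ¬ x.length ≤ 1) :
    hiffF x = (if hiffUnif x then (x.length : Int) else 0)
      + hiffF (x.take (x.length / 2)) + hiffF (x.drop (x.length / 2)) := by
  rw [hiffF, if_neg h]

theorem hiffUnif_head (x : List String) (h : hiffUnif x = true) : x.headI ≠ "-" := by
  simp only [hiffUnif, decide_eq_true_eq] at h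
  exact h.1

theorem hiffUnif_append (l r : List String) (hl : l ≠ []) (hr : r ≠ []) :
    hiffUnif (l ++ r) = (hiffUnif l && hiffUnif r && (l.headI == r.headI)) := by
  cases l with
  | nil => exact absurd rfl hl
  | cons a l' =>
    cases r with
    | nil => exact absurd rfl hr
    | cons b r' =>
      rw [Bool.eq_iff_iff]
      simp only [hiffUnif, List.cons_append, List.headI, Bool.and_eq_true,
        decide_eq_true_eq, beq_iff_eq, List.mem_cons, List.mem_append]
      constructor
      · rintro ⟨hne, hall⟩
        have hba : b = a := hall b (Or.inr (Or.inr (Or.inl rfl)))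
        refine ⟨⟨⟨hne, fun e he => hall e ?_⟩, ⟨by rw [hba]; exact hne, fun e he => ?_⟩⟩, hba.symm⟩
        · rcases he with h | h
          · exact Or.inl h
          · exact Or.inr (Or.inl h)
        · rw [hba]
          rcases he with h | h
          · exact h ▸ hba
          · exact hall e (Or.inr (Or.inr (Or.inr h)))
      · rintro ⟨⟨⟨hne, halll⟩, ⟨hbne, hallr⟩⟩, hab⟩
        refine ⟨hne, fun e he => ?_⟩
        rcases he with h | h | h | h
        · exact h
        · exact halll e (Or.inr h)
        · rw [h, hallr b (Or.inl rfl), ← hab]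
        · rw [hallr e (Or.inr h), ← hab]

theorem hiffV_ne (x : List String) (hx : x ≠ []) :
    (hiffV x ≠ "-" ↔ hiffUnif x = true) ∧ (hiffUnif x = true → hiffV x = x.headI) := by
  by_cases h1 : x.length = 1
  · obtain ⟨a, ha⟩ : ∃ a, x = [a] := by
      cases x with
      | nil => simp at h1
      | cons a l =>
        cases l with
        | nil => exact ⟨a, rfl⟩
        | cons b l' => simp at h1
    subst ha
    simp [hiffV, hiffUnif]
  · constructor
    · by_cases hu : hiffUnif x = true
      · simp only [hiffV, if_neg h1, hu, iff_true]
        exact hiffUnif_head _ hu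
      · simp only [hiffV, if_neg h1, if_neg hu, ne_eq, not_true_eq_false, false_iff]
        exact hu
    · intro hu
      simp only [hiffV, if_neg h1, if_pos hu]

theorem headI_take (x : List String) (n : Nat) (hn : 1 ≤ n) (hx : x ≠ []) :
    (x.take n).headI = x.headI := by
  cases x with
  | nil => exact absurd rfl hx
  | cons a l =>
    cases n with
    | zero => omega
    | succ m => simp [List.take]

theorem take_half_ne_nil (x : List String) (h1 : ¬ x.length = 1) (h0 : ¬ x.length = 0) :
    x.take (x.length / 2) ≠ [] := by
  intro h
  have h2 := congrArg List.length h
  rw [List.length_take] at h2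
  simp only [List.length_nil] at h2
  omega

theorem drop_half_ne_nil (x : List String) (_h1 : ¬ x.length = 1) (h0 : ¬ x.length = 0) :
    x.drop (x.length / 2) ≠ [] := by
  intro h
  have h2 := congrArg List.length h
  rw [List.length_drop] at h2
  simp only [List.length_nil] at h2
  omega

theorem hiff_node_eq (fuel : Nat) (x : List String) (h1 : ¬ x.length = 1) (h0 : ¬ x.length = 0)
    (IHl : hiffGo fuel (x.take (x.length / 2)) = (hiffF (x.take (x.length / 2)), hiffV (x.take (x.length / 2))))
    (IHr : hiffGo fuel (x.drop (x.length / 2)) = (hiffF (x.drop (x.length / 2)), hiffV (x.drop (x.length / 2)))) :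
    hiffGo (fuel + 1) x = (hiffF x, hiffV x) := by
  have hx : x ≠ [] := by intro h; rw [h] at h0; simp at h0
  have hlen : 2 ≤ x.length := by
    have := List.length_pos_iff.mpr hx
    omega
  have hsplit : 1 ≤ x.length / 2 := by omega
  have htn := take_half_ne_nil x h1 h0
  have hdn := drop_half_ne_nil x h1 h0
  have hvl := hiffV_ne _ htn
  have hvr := hiffV_ne _ hdn
  have happ := hiffUnif_append _ _ htn hdn
  rw [List.take_append_drop] at happ
  have hhead : (x.take (x.length / 2)).headI = x.headI := headI_take x _ hsplit hx
  show (if x.length = 1 then ((0 : Int), x.headI)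
    else if x.length = 0 then ((0 : Int), "-")
    else
      let split := x.length / 2
      let l := hiffGo fuel (x.take split)
      let r := hiffGo fuel (x.drop split)
      if r.2 ≠ l.2 ∨ l.2 = "-" ∨ r.2 = "-" then (l.1 + r.1, "-")
      else ((x.length : Int) + l.1 + r.1, l.2)) = (hiffF x, hiffV x)
  rw [if_neg h1, if_neg h0]
  simp only [IHl, IHr]
  have hcond : (hiffV (x.drop (x.length / 2)) ≠ hiffV (x.take (x.length / 2)) ∨
      hiffV (x.take (x.length / 2)) = "-" ∨ hiffV (x.drop (x.length / 2)) = "-") ↔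
      ¬ hiffUnif x = true := by
    constructor
    · intro hd hu
      rw [happ] at hu
      simp only [Bool.and_eq_true, beq_iff_eq] at hu
      obtain ⟨⟨hul, hur⟩, hh⟩ := hu
      rcases hd with h | h | h
      · exact h (by rw [hvr.2 hur, hvl.2 hul, hh])
      · exact (hvl.1.mpr hul) h
      · exact (hvr.1.mpr hur) h
    · intro hu
      by_cases hul : hiffUnif (x.take (x.length / 2)) = true
      · by_cases hur : hiffUnif (x.drop (x.length / 2)) = true
        · left
          intro heq
          apply hu
          rw [happ]
          simp only [Bool.and_eq_true, beq_iff_eq]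
          exact ⟨⟨hul, hur⟩, by rw [← hvl.2 hul, ← hvr.2 hur, heq]⟩
        · right; right
          exact not_not.mp (fun h => hur (hvr.1.mp h))
      · right; left
        exact not_not.mp (fun h => hul (hvl.1.mp h))
  by_cases hu : hiffUnif x = true
  · rw [if_neg (fun hc => (hcond.mp hc) hu)]
    have hul : hiffUnif (x.take (x.length / 2)) = true := by
      rw [happ] at hu; simp only [Bool.and_eq_true] at hu; exact hu.1.1
    refine Prod.ext ?_ ?_
    · show (x.length : Int) + hiffF (x.take (x.length / 2)) + hiffF (x.drop (x.length / 2)) = hiffF x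
      rw [hiffF_node x (by omega), if_pos hu]
    · show hiffV (x.take (x.length / 2)) = hiffV x
      rw [hvl.2 hul, hhead, hiffV, if_neg h1, if_pos hu]
  · rw [if_pos (hcond.mpr hu)]
    refine Prod.ext ?_ ?_
    · show hiffF (x.take (x.length / 2)) + hiffF (x.drop (x.length / 2)) = hiffF x
      rw [hiffF_node x (by omega), if_neg hu]
      ring
    · show "-" = hiffV x
      simp only [hiffV, if_neg h1, if_neg hu]

theorem hiffGo_eq (fuel : Nat) : ∀ (x : List String), x ≠ [] → x.length ≤ fuel →
    hiffGo fuel x = (hiffF x, hiffV x) := by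
  induction fuel with
  | zero =>
    intro x hx hle
    have := List.length_pos_iff.mpr hx
    omega
  | succ fuel ih =>
    intro x hx hle
    by_cases h1 : x.length = 1
    · show (if x.length = 1 then ((0 : Int), x.headI) else _) = (hiffF x, hiffV x)
      rw [if_pos h1, hiffF_leaf x (by omega), hiffV, if_pos h1]
    · have h0 : ¬ x.length = 0 := by
        have := List.length_pos_iff.mpr hx
        omega
      have hlen : 2 ≤ x.length := by omega
      refine hiff_node_eq fuel x h1 h0
        (ih _ (take_half_ne_nil x h1 h0) ?_) (ih _ (drop_half_ne_nil x h1 h0) ?_)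
      · have := pvDecTake' x h1 h0
        omega
      · have := pvDecDrop' x h1 h0
        omega

theorem hiff_eq_FV (x : List String) (hx : x ≠ []) : hiff x = (hiffF x, hiffV x) :=
  hiffGo_eq x.length x hx le_rfl

theorem hiffLoopGo_eq (fuel : Nat) : ∀ (stack : List (List String)) (fitness : Int),
    pvMeasure stack ≤ fuel →
    hiffLoopGo fuel stack fitness = fitness + (stack.map hiffF).sum := by
  induction fuel with
  | zero =>
    intro stack fitness hle
    cases stack with
    | nil => simp [hiffLoopGo]
    | cons seg rest =>
      exfalso
      have := pvDecSkip seg rest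
      omega
  | succ fuel ih =>
    intro stack fitness hle
    cases stack with
    | nil => simp [hiffLoopGo]
    | cons seg rest =>
      show (if seg.length ≤ 1 then hiffLoopGo fuel rest fitness
        else hiffLoopGo fuel (seg.drop (seg.length / 2) :: seg.take (seg.length / 2) :: rest)
          (if hiffUnif seg then fitness + (seg.length : Int) else fitness))
        = fitness + ((seg :: rest).map hiffF).sum
      by_cases h1 : seg.length ≤ 1
      · rw [if_pos h1, ih rest fitness (by have := pvDecSkip seg rest; omega)]
        simp [hiffF_leaf seg h1]
      · rw [if_neg h1, ih _ _ (by have := pvDecSplit seg rest h1; omega)]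
        simp only [List.map_cons, List.sum_cons]
        rw [hiffF_node seg h1]
        split_ifs <;> ring

theorem hiff_alt_eq_FV (x : List String) (hx : x ≠ []) : hiff_alt x = (hiffF x, hiffV x) := by
  unfold hiff_alt
  by_cases h1 : x.length = 1
  · rw [if_pos h1, hiffF_leaf x (by omega), hiffV, if_pos h1]
  · rw [if_neg h1, if_neg hx]
    have hm : pvMeasure [x] ≤ 2 * x.length + 1 := by
      simp only [pvMeasure, List.map_cons, List.map_nil, List.sum_cons, List.sum_nil]
      split_ifs <;> omega
    rw [hiffLoopGo_eq (2 * x.length + 1) [x] 0 hm]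
    simp only [List.map_cons, List.map_nil, List.sum_cons, List.sum_nil, add_zero, zero_add]
    rw [hiffV, if_neg h1]

-- ===== VERDICT (by name: the statement is the Claim_ definition above) =====
theorem hiff_spec : Claim_equal_hiff := by
  intro x _ hx
  unfold Spec_hiff
  rw [hiff_eq_FV x hx, hiff_alt_eq_FV x hx]
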